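-- pv_equiv track=rewrite | github.com/dalyai33/NurseSim | backend-database/classes.py | _levels_to_bitmask
-- ===== SOURCE A (Python) =====
-- def _levels_to_bitmask(levels):
--     """Convert list of levels (1,2,3) to bitmask."""
--     mask = 0
--     for L in levels:
--         if L == 1:
--             mask |= 1
--         elif L == 2:
--             mask |= 2
--         elif L == 3:
--             mask |= 4
--     return mask if mask else 1
-- ===== SOURCE B (Python) =====
-- def _levels_to_bitmask(levels):
--     """Convert list of levels (1,2,3) to bitmask."""
--     present = {1, 2, 3} & set(levels)
--     return sum(1 << (v - 1) for v in present) or 1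
-- ===== Notes on version B (the rewrite author's own statement) =====
-- stated objective: idiomatic
-- what changed: B intersects the constant set {1,2,3} with set(levels) (deduplicating once, no per-element if/elif chain) and computes the mask arithmetically as a sum of shifts 1 << (v-1) over the intersection, keeping the or-1 floor.
import Mathlib
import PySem

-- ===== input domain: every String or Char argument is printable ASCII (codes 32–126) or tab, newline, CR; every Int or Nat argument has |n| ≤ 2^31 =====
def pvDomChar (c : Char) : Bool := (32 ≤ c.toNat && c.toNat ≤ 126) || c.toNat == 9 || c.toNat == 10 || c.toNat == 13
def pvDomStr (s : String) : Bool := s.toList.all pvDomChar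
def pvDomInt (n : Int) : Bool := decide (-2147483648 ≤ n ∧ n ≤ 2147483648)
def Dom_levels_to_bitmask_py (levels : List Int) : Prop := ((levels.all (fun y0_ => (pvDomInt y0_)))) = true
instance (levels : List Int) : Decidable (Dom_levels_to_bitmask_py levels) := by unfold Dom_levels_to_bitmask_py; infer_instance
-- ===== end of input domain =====

-- B replaces A's accumulating if/elif loop by a set intersection {1,2,3} & set(levels) and an arithmetic sum of shifts 1 << (v-1) (idiomatic).

-- ===== PORT A =====
def levels_to_bitmask_py (levels : List Int) : Int :=
  let mask := levels.foldl (fun mask L =>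
    if L = 1 then Int.lor mask 1
    else if L = 2 then Int.lor mask 2
    else if L = 3 then Int.lor mask 4
    else mask) 0
  if mask = 0 then 1 else mask

-- ===== PORT B =====
-- present = {1,2,3} & set(levels); summed in {1,2,3}'s order (exact: sum is order-independent).
-- '1 << (v - 1)' is 2 ^ (v - 1).toNat: every v ∈ present satisfies 1 ≤ v ≤ 3, so toNat is exact.
def levels_to_bitmask_py_alt (levels : List Int) : Int :=
  let present := PySem.Set.inter (PySem.Set.ofList [1, 2, 3]) (PySem.Set.ofList levels)
  let mask := present.foldl (fun acc v => acc + (2 : Int) ^ (v - 1).toNat) 0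
  if mask = 0 then 1 else mask

-- ===== PRECONDITION & SPEC =====
def Spec_levels_to_bitmask_py (levels : List Int) (out : Int) : Prop := out = levels_to_bitmask_py_alt levels
instance (levels : List Int) (out : Int) : Decidable (Spec_levels_to_bitmask_py levels out) := by unfold Spec_levels_to_bitmask_py; infer_instance

-- ===== CLAIM (what is proved, stated in full; the proofs are below) =====
def Claim_equal_levels_to_bitmask_py : Prop := ∀ (levels : List Int), Dom_levels_to_bitmask_py levels → Spec_levels_to_bitmask_py levels (levels_to_bitmask_py levels)

-- ===== LEMMAS AND PROOFS =====

def pvStep : Int → Int → Int := fun mask L =>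
  if L = 1 then Int.lor mask 1
  else if L = 2 then Int.lor mask 2
  else if L = 3 then Int.lor mask 4
  else mask

def pvBit (L : Int) : Int :=
  if L = 1 then 1 else if L = 2 then 2 else if L = 3 then 4 else 0

-- the presence mask as three membership tests (proof-internal characterisation)
def pvBits (levels : List Int) : Int :=
  (if (1 : Int) ∈ levels then (1 : Int) else 0)
  + (if (2 : Int) ∈ levels then 2 else 0)
  + (if (3 : Int) ∈ levels then 4 else 0)

theorem pvBits_nonneg (ls : List Int) : 0 ≤ pvBits ls := by
  unfold pvBits; split_ifs <;> decide

theorem pvBits_lt (ls : List Int) : pvBits ls < 8 := by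
  unfold pvBits; split_ifs <;> decide

theorem pvBit_nonneg (L : Int) : 0 ≤ pvBit L := by
  unfold pvBit; split_ifs <;> decide

theorem pvBit_lt (L : Int) : pvBit L < 8 := by
  unfold pvBit; split_ifs <;> decide

theorem pvLor_assoc (a b c : Int) (ha0 : 0 ≤ a) (ha : a < 8) (hb0 : 0 ≤ b) (hb : b < 8)
    (hc0 : 0 ≤ c) (hc : c < 8) :
    Int.lor (Int.lor a b) c = Int.lor a (Int.lor b c) := by
  interval_cases a <;> interval_cases b <;> interval_cases c <;> decide

theorem pvLor_zero (a : Int) (ha0 : 0 ≤ a) (ha : a < 8) : Int.lor a 0 = a := by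
  interval_cases a <;> decide

theorem pvZero_lor (a : Int) (ha0 : 0 ≤ a) (ha : a < 8) : Int.lor 0 a = a := by
  interval_cases a <;> decide

theorem pvLor_nonneg (a b : Int) (ha0 : 0 ≤ a) (ha : a < 8) (hb0 : 0 ≤ b) (hb : b < 8) :
    0 ≤ Int.lor a b ∧ Int.lor a b < 8 := by
  interval_cases a <;> interval_cases b <;> exact ⟨by decide, by decide⟩

theorem pvStep_eq (m L : Int) (h0 : 0 ≤ m) (h8 : m < 8) : pvStep m L = Int.lor m (pvBit L) := by
  unfold pvStep pvBit
  split_ifs <;> first | rfl | exact (pvLor_zero m h0 h8).symm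

theorem pvBits_cons (L : Int) (ls : List Int) :
    pvBits (L :: ls) = Int.lor (pvBit L) (pvBits ls) := by
  by_cases h1 : L = 1
  · subst h1
    unfold pvBits pvBit
    simp only [List.mem_cons, true_or]
    split_ifs <;> simp_all <;> decide
  · by_cases h2 : L = 2
    · subst h2
      unfold pvBits pvBit
      simp only [List.mem_cons]
      split_ifs <;> simp_all <;> decide
    · by_cases h3 : L = 3
      · subst h3
        unfold pvBits pvBit
        simp only [List.mem_cons]
        split_ifs <;> simp_all <;> decide
      · unfold pvBits pvBit
        rw [if_neg h1, if_neg h2, if_neg h3]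
        have e1 : ((1 : Int) ∈ L :: ls) ↔ ((1 : Int) ∈ ls) := by
          simp [List.mem_cons]; intro h; exact absurd h.symm h1
        have e2 : ((2 : Int) ∈ L :: ls) ↔ ((2 : Int) ∈ ls) := by
          simp [List.mem_cons]; intro h; exact absurd h.symm h2
        have e3 : ((3 : Int) ∈ L :: ls) ↔ ((3 : Int) ∈ ls) := by
          simp [List.mem_cons]; intro h; exact absurd h.symm h3
        simp only [e1, e2, e3]
        exact (pvZero_lor _ (pvBits_nonneg ls) (pvBits_lt ls)).symm

theorem pvFold_eq (levels : List Int) : ∀ m : Int, 0 ≤ m → m < 8 →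
    levels.foldl pvStep m = Int.lor m (pvBits levels) := by
  induction levels with
  | nil =>
      intro m h0 h8
      have : pvBits ([] : List Int) = 0 := by decide
      simp [this, pvLor_zero m h0 h8]
  | cons L ls ih =>
      intro m h0 h8
      have hstep := pvLor_nonneg m (pvBit L) h0 h8 (pvBit_nonneg L) (pvBit_lt L)
      calc (L :: ls).foldl pvStep m = ls.foldl pvStep (pvStep m L) := rfl
        _ = ls.foldl pvStep (Int.lor m (pvBit L)) := by rw [pvStep_eq m L h0 h8]
        _ = Int.lor (Int.lor m (pvBit L)) (pvBits ls) := ih _ hstep.1 hstep.2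
        _ = Int.lor m (Int.lor (pvBit L) (pvBits ls)) :=
            pvLor_assoc m (pvBit L) (pvBits ls) h0 h8 (pvBit_nonneg L) (pvBit_lt L)
              (pvBits_nonneg ls) (pvBits_lt ls)
        _ = Int.lor m (pvBits (L :: ls)) := by rw [pvBits_cons]

-- B's intersection-and-sum mask equals the three-membership mask pvBits
theorem pvAltMask_eq (levels : List Int) :
    (PySem.Set.inter (PySem.Set.ofList [1, 2, 3]) (PySem.Set.ofList levels)).foldl
      (fun acc v => acc + (2 : Int) ^ (v - 1).toNat) 0 = pvBits levels := by
  have hlit : PySem.Set.ofList ([1, 2, 3] : List Int) = [1, 2, 3] := by decide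
  unfold pvBits
  by_cases m1 : (1 : Int) ∈ levels <;> by_cases m2 : (2 : Int) ∈ levels <;>
    by_cases m3 : (3 : Int) ∈ levels <;>
      simp [PySem.Set.inter, hlit, List.filter, PySem.Set.mem_ofList, m1, m2, m3, List.foldl]

-- ===== VERDICT (by name: the statement is the Claim_ definition above) =====
theorem levels_to_bitmask_py_spec : Claim_equal_levels_to_bitmask_py := by
  intro levels _
  have h : levels.foldl pvStep 0 = pvBits levels := by
    rw [pvFold_eq levels 0 (by decide) (by decide),
      pvZero_lor _ (pvBits_nonneg levels) (pvBits_lt levels)]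
  show levels_to_bitmask_py levels = levels_to_bitmask_py_alt levels
  simp only [levels_to_bitmask_py, levels_to_bitmask_py_alt]
  rw [show (fun mask L =>
    if L = 1 then Int.lor mask 1
    else if L = 2 then Int.lor mask 2
    else if L = 3 then Int.lor mask 4
    else mask) = pvStep from rfl, h, pvAltMask_eq]
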